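-- pv_equiv track=rewrite | github.com/manohar9600/Finance-Extraction | code_archive/data_generator.py | get_latest_year_index
-- ===== SOURCE A (Python) =====
-- def get_latest_year_index(headers):
--     years = []
--     for col in headers:
--         if 'months ended' in col.lower() and not '12 months ended' in col.lower():
--             years.append(-1)
--             continue
--         try:
--             yr = int(col.split()[-1])
--             if 'jan' in col.lower() or 'january' in col.lower():
--                 yr = yr - 1
--         except:
--             yr = -1
--         years.append(yr)
--
--     max_index = years.index(max(years))
--     return max_index, max(years)
-- ===== SOURCE B (Python) =====
-- # Single-pass scan: track best (year, index) while iterating, instead of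
-- # building the full years list and scanning it twice with max() and .index().
-- def get_latest_year_index(headers):
--     def year_of(col):
--         low = col.lower()
--         if 'months ended' in low and '12 months ended' not in low:
--             return -1
--         try:
--             yr = int(col.split()[-1])
--         except Exception:
--             return -1
--         return yr - 1 if 'jan' in low else yr
--
--     best_year = year_of(headers[0])
--     best_index = 0
--     for i, col in enumerate(headers[1:], 1):
--         y = year_of(col)
--         if y > best_year:
--             best_year, best_index = y, i
--     return best_index, best_year
-- ===== Notes on version B (the rewrite author's own statement) =====
-- stated objective: alternative
-- what changed: Replaces the build-years-list-then-scan-twice (max() then .index()) structure with a single pass that tracks the running best year and its first index.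
-- outside the precondition, e.g. on get_latest_year_index([]): A raises ValueError, B raises IndexError
import Mathlib
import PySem

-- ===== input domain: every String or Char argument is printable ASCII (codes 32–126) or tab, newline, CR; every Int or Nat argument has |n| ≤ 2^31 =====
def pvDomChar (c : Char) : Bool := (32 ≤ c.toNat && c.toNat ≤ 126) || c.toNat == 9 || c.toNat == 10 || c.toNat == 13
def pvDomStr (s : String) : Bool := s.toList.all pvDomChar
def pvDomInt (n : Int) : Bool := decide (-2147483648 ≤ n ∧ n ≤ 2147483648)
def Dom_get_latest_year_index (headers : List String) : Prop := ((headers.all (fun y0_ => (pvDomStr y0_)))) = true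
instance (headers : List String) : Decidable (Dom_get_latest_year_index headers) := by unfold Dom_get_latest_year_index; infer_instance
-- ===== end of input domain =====

-- B is a single-pass scan (running best year + first index) instead of A's
-- build-the-years-list-then-max-then-index structure; same cost, plainer shape.

-- ===== PORT A =====
def get_latest_year_index (headers : List String) : Int × Int :=
  let years : List Int := headers.foldl (fun acc col =>
    let low := PySem.Str.lower col
    if PySem.Str.isIn "months ended" low && !(PySem.Str.isIn "12 months ended" low) then
      acc ++ [(-1 : Int)]
    else
      let yr : Int :=
        match PySem.List.pyGet? (PySem.Str.split₀ col) (-1) with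
        | none => -1          -- IndexError caught by the bare except → yr = -1
        | some w =>
          match PySem.Int.ofStr? w with
          | none => -1        -- ValueError caught by the bare except → yr = -1
          | some y =>
            if PySem.Str.isIn "jan" low || PySem.Str.isIn "january" low then y - 1 else y
      acc ++ [yr]) []
  match PySem.List.max? years (fun y => y) with
  | none => (0, 0)            -- max([]) raises ValueError in Python: excluded by Pre_
  | some m => ((((PySem.List.index? years m).getD 0 : Nat) : Int), m)

-- ===== PORT B =====
def altYear (col : String) : Int :=
  let low := PySem.Str.lower col
  if PySem.Str.isIn "months ended" low && !(PySem.Str.isIn "12 months ended" low) then -1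
  else
    match PySem.List.pyGet? (PySem.Str.split₀ col) (-1) with
    | none => -1
    | some w =>
      match PySem.Int.ofStr? w with
      | none => -1
      | some y => if PySem.Str.isIn "jan" low then y - 1 else y

def get_latest_year_index_alt (headers : List String) : Int × Int :=
  match headers with
  | [] => (0, 0)              -- headers[0] raises IndexError in Python B: excluded by Pre_
  | h :: t =>
    let st := t.foldl (fun (st : Int × Int × Int) col =>
      let best := st.1
      let bi := st.2.1
      let i := st.2.2
      let y := altYear col
      if best < y then (y, i, i + 1) else (best, bi, i + 1)) (altYear h, 0, 1)
    (st.2.1, st.1)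

-- ===== PRECONDITION & SPEC =====
-- Pre_ excludes only the empty list, on which A raises ValueError (max of empty sequence).
def Pre_get_latest_year_index (headers : List String) : Prop := headers ≠ []
instance (headers : List String) : Decidable (Pre_get_latest_year_index headers) := by
  unfold Pre_get_latest_year_index; infer_instance
def pvWitness_get_latest_year_index : List String := ["Twelve Months Ended Dec 2020"]

def Spec_get_latest_year_index (headers : List String) (out : Int × Int) : Prop := out = get_latest_year_index_alt headers
instance (headers : List String) (out : Int × Int) : Decidable (Spec_get_latest_year_index headers out) := by unfold Spec_get_latest_year_index; infer_instance

-- ===== CLAIM (what is proved, stated in full; the proofs are below) =====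
def Claim_equal_get_latest_year_index : Prop := ∀ (headers : List String), Dom_get_latest_year_index headers → Pre_get_latest_year_index headers → Spec_get_latest_year_index headers (get_latest_year_index headers)

-- ===== LEMMAS AND PROOFS =====

-- 'january' in low is redundant given 'jan' in low, so A's per-column year equals B's.
theorem jan_redundant (low : String) :
    (PySem.Str.isIn "jan" low || PySem.Str.isIn "january" low) = PySem.Str.isIn "jan" low := by
  by_cases h : PySem.Str.isIn "january" low = true
  · have hj : PySem.Str.isIn "jan" low = true := by
      rw [PySem.Str.isIn_iff_infix] at h ⊢
      exact List.IsInfix.trans (by decide) h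
    rw [hj, h]
    rfl
  · rw [Bool.not_eq_true] at h
    rw [h, Bool.or_false]

theorem body_eq (acc : List Int) (col : String) :
    (let low := PySem.Str.lower col
     if PySem.Str.isIn "months ended" low && !(PySem.Str.isIn "12 months ended" low) then
       acc ++ [(-1 : Int)]
     else
       let yr : Int :=
         match PySem.List.pyGet? (PySem.Str.split₀ col) (-1) with
         | none => -1
         | some w =>
           match PySem.Int.ofStr? w with
           | none => -1
           | some y =>
             if PySem.Str.isIn "jan" (PySem.Str.lower col) || PySem.Str.isIn "january" (PySem.Str.lower col) then y - 1 else y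
       acc ++ [yr]) = acc ++ [altYear col] := by
  simp only [altYear, jan_redundant]
  split <;> rfl

-- the B step function, over the already-computed year values
def bstep (st : Int × Int × Int) (y : Int) : Int × Int × Int :=
  if st.1 < y then (y, st.2.2, st.2.2 + 1) else (st.1, st.2.1, st.2.2 + 1)

theorem foldl_bstep (t : List String) (st : Int × Int × Int) :
    t.foldl (fun (st : Int × Int × Int) col =>
      let best := st.1
      let bi := st.2.1
      let i := st.2.2
      let y := altYear col
      if best < y then (y, i, i + 1) else (best, bi, i + 1)) st
      = (t.map altYear).foldl bstep st := by
  induction t generalizing st with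
  | nil => rfl
  | cons c t ih => simp only [List.foldl_cons, List.map_cons, ih, bstep]

-- main invariant of the single-pass loop
theorem bstep_invariant (ys : List Int) (best bi i : Int) :
    ys.foldl bstep (best, bi, i)
      = (ys.foldl max best,
         if best < ys.foldl max best then i + (((PySem.List.index? ys (ys.foldl max best)).getD 0 : Nat) : Int) else bi,
         i + ys.length) := by
  induction ys generalizing best bi i with
  | nil => simp
  | cons z ys ih =>
    simp only [List.foldl_cons, bstep]
    by_cases hz : best < z
    · have hmaxz : max best z = z := by omega
      rw [if_pos hz, ih, hmaxz]
      have hzle : z ≤ ys.foldl max z := (PySem.List.le_foldl_max ys z).1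
      have hblt : best < ys.foldl max z := by omega
      rw [if_pos hblt]
      by_cases hzm : z < ys.foldl max z
      · have hne : z ≠ ys.foldl max z := by omega
        rw [if_pos hzm, PySem.List.index?_cons_of_ne ys hne]
        have hmem : ys.foldl max z ∈ z :: ys :=
          PySem.List.max?_mem (xs := z :: ys) (key := fun y => y)
            (m := ys.foldl max z) (by rw [PySem.List.max?_id_cons])
        have hmem' : ys.foldl max z ∈ ys := by
          rcases List.mem_cons.mp hmem with h | h
          · omega
          · exact h
        obtain ⟨k, hk⟩ := Option.ne_none_iff_exists'.mp
          (fun hn => ((PySem.List.index?_eq_none_iff _ _).mp hn) hmem')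
        rw [hk]
        simp only [Option.map_some, Option.getD_some, List.length_cons, Prod.mk.injEq]
        refine ⟨?_, ?_, ?_⟩ <;> first | trivial | (push_cast; ring)
      · have hzm' : z = ys.foldl max z := by omega
        rw [if_neg hzm, ← hzm', PySem.List.index?_cons_self]
        simp only [Option.getD_some, Nat.cast_zero, add_zero, List.length_cons,
          Prod.mk.injEq]
        refine ⟨?_, ?_, ?_⟩ <;> first | trivial | (push_cast; ring)
    · have hmaxz : max best z = best := by omega
      rw [if_neg hz, ih, hmaxz]
      by_cases hbm : best < ys.foldl max best
      · have hzne : z ≠ ys.foldl max best := by omega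
        rw [if_pos hbm, if_pos hbm, PySem.List.index?_cons_of_ne ys hzne]
        have hmem : ys.foldl max best ∈ best :: ys :=
          PySem.List.max?_mem (xs := best :: ys) (key := fun y => y)
            (m := ys.foldl max best) (by rw [PySem.List.max?_id_cons])
        have hmem' : ys.foldl max best ∈ ys := by
          rcases List.mem_cons.mp hmem with h | h
          · omega
          · exact h
        obtain ⟨k, hk⟩ := Option.ne_none_iff_exists'.mp
          (fun hn => ((PySem.List.index?_eq_none_iff _ _).mp hn) hmem')
        rw [hk]
        simp only [Option.map_some, Option.getD_some, List.length_cons, Prod.mk.injEq]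
        refine ⟨?_, ?_, ?_⟩ <;> first | trivial | (push_cast; ring)
      · rw [if_neg hbm, if_neg hbm]
        simp only [List.length_cons, Prod.mk.injEq]
        refine ⟨?_, ?_, ?_⟩ <;> first | trivial | (push_cast; ring)

-- ===== VERDICT (by name: the statement is the Claim_ definition above) =====
theorem get_latest_year_index_spec : Claim_equal_get_latest_year_index := by
  intro headers _ hpre
  unfold Spec_get_latest_year_index
  match headers with
  | [] => exact absurd rfl hpre
  | h :: t =>
    unfold get_latest_year_index get_latest_year_index_alt
    have hyears : (h :: t).foldl (fun acc col =>
        let low := PySem.Str.lower col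
        if PySem.Str.isIn "months ended" low && !(PySem.Str.isIn "12 months ended" low) then
          acc ++ [(-1 : Int)]
        else
          let yr : Int :=
            match PySem.List.pyGet? (PySem.Str.split₀ col) (-1) with
            | none => -1
            | some w =>
              match PySem.Int.ofStr? w with
              | none => -1
              | some y =>
                if PySem.Str.isIn "jan" low || PySem.Str.isIn "january" low then y - 1 else y
          acc ++ [yr]) [] = altYear h :: t.map altYear := by
      have : ∀ (l : List String) (acc : List Int), l.foldl (fun acc col =>
          let low := PySem.Str.lower col
          if PySem.Str.isIn "months ended" low && !(PySem.Str.isIn "12 months ended" low) then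
            acc ++ [(-1 : Int)]
          else
            let yr : Int :=
              match PySem.List.pyGet? (PySem.Str.split₀ col) (-1) with
              | none => -1
              | some w =>
                match PySem.Int.ofStr? w with
                | none => -1
                | some y =>
                  if PySem.Str.isIn "jan" low || PySem.Str.isIn "january" low then y - 1 else y
            acc ++ [yr]) acc = acc ++ l.map altYear := by
        intro l
        induction l with
        | nil => simp
        | cons c l ih =>
          intro acc
          simp only [List.foldl_cons, List.map_cons]
          rw [body_eq acc c, ih]
          simp
      simpa using this (h :: t) []
    simp only [hyears, foldl_bstep, bstep_invariant, PySem.List.max?_id_cons]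
    set m := (t.map altYear).foldl max (altYear h) with hm
    have hle : altYear h ≤ m := (PySem.List.le_foldl_max (t.map altYear) (altYear h)).1
    by_cases hlt : altYear h < m
    · rw [if_pos hlt]
      have hne : altYear h ≠ m := by omega
      rw [PySem.List.index?_cons_of_ne (t.map altYear) hne]
      have hmem' : m ∈ t.map altYear := by
        have hmem : m ∈ altYear h :: t.map altYear :=
          PySem.List.max?_mem (xs := altYear h :: t.map altYear) (key := fun y => y)
            (m := m) (by rw [PySem.List.max?_id_cons])
        rcases List.mem_cons.mp hmem with h' | h'
        · omega
        · exact h'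
      obtain ⟨k, hk⟩ := Option.ne_none_iff_exists'.mp
        (fun hn => ((PySem.List.index?_eq_none_iff _ _).mp hn) hmem')
      rw [hk]
      simp only [Option.map_some, Option.getD_some, Prod.mk.injEq]
      refine ⟨?_, ?_⟩ <;> first | trivial | (push_cast; ring)
    · have heq : altYear h = m := by omega
      rw [if_neg hlt, ← heq, PySem.List.index?_cons_self]
      simp
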